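-- pv_equiv track=rewrite | github.com/dpkp/kafka-python | kafka/benchmarks/varint_speed.py | decode_varint_3
-- ===== SOURCE A (Python) =====
-- def decode_varint_3(buffer, pos=0):
--     result = buffer[pos]
--     if not (result & 0x81):
--         return (result >> 1), pos + 1
--     if not (result & 0x80):
--         return (result >> 1) ^ (~0), pos + 1
--
--     result &= 0x7f
--     pos += 1
--     shift = 7
--     while 1:
--         b = buffer[pos]
--         result |= ((b & 0x7f) << shift)
--         pos += 1
--         if not (b & 0x80):
--             return ((result >> 1) ^ -(result & 1), pos)
--         shift += 7
--         if shift >= 64: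
--             raise ValueError("Out of int64 range")
-- ===== SOURCE B (Python) =====
-- def decode_varint_3(buffer, pos=0):
--     # pass 1: locate the terminator byte (bit 7 clear) among the next 10 bytes
--     n = 0
--     while True:
--         if n == 10:
--             raise ValueError("Out of int64 range")
--         if not (buffer[pos + n] & 0x80):
--             break
--         n += 1
--     # pass 2: combine the 7-bit groups from the most significant byte down
--     if n == 0:
--         raw = buffer[pos]
--     else:
--         raw = buffer[pos + n] & 0x7f
--         for i in range(pos + n - 1, pos - 1, -1):
--             raw = (raw << 7) | (buffer[i] & 0x7f)
--     # zigzag decode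
--     return (raw >> 1) ^ -(raw & 1), pos + n + 1
-- ===== Notes on version B (the rewrite author's own statement) =====
-- stated objective: alternative
-- what changed: Replaces A's single forward loop with fast-path branches and a running shift accumulator by a two-pass scheme: first scan for the terminator byte (bit 7 clear, at most 10 bytes), then combine the 7-bit groups back-to-front with (raw<<7)|group and zigzag-decode once at the end.
import Mathlib
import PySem

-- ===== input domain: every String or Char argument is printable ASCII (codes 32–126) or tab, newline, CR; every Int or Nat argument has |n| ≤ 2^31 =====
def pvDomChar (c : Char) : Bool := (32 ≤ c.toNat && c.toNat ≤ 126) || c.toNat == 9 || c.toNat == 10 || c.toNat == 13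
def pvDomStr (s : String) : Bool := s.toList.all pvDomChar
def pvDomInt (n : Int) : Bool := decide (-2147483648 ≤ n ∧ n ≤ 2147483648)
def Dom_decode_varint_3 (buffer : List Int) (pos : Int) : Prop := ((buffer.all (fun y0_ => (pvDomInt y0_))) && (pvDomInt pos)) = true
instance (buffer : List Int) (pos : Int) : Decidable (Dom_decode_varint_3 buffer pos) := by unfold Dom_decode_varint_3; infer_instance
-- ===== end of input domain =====

-- B replaces A's one forward loop (with two single-byte fast paths and a running
-- shift accumulator) by a two-pass scheme: scan for the terminator byte, then
-- combine the 7-bit groups back-to-front; same values, no speed claim.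

-- ===== PORT A =====
-- the 'while 1' loop of A; fuel bounds the recursion (the loop itself runs at
-- most 9 iterations before returning or raising); (0, 0) marks the raising
-- branches (IndexError / ValueError), which Pre_ excludes
def decodeVarintLoopA (buffer : List Int) (result pos : Int) (shift : Nat) (fuel : Nat) : Int × Int :=
  match fuel with
  | 0 => (0, 0)
  | fuel + 1 =>
    match PySem.List.pyGet? buffer pos with
    | none => (0, 0)  -- IndexError, excluded by Pre_
    | some b =>
      let result' := PySem.Int.bor result (PySem.Int.band b 127 <<< shift)
      if PySem.Int.band b 128 = 0 then
        (PySem.Int.bxor (result' >>> 1) (-(PySem.Int.band result' 1)), pos + 1)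
      else if shift + 7 ≥ 64 then (0, 0)  -- ValueError, excluded by Pre_
      else decodeVarintLoopA buffer result' (pos + 1) (shift + 7) fuel

def decode_varint_3 (buffer : List Int) (pos : Int) : Int × Int :=
  match PySem.List.pyGet? buffer pos with
  | none => (0, 0)  -- IndexError, excluded by Pre_
  | some result =>
    if PySem.Int.band result 129 = 0 then (result >>> 1, pos + 1)
    else if PySem.Int.band result 128 = 0 then
      (PySem.Int.bxor (result >>> 1) (Int.not 0), pos + 1)
    else decodeVarintLoopA buffer (PySem.Int.band result 127) (pos + 1) 7 9

-- ===== PORT B =====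
-- pass 1 of Source B: the 'while True' scan for the terminator byte; none marks the
-- raising branches (ValueError at n = 10 / IndexError), which Pre_ excludes
def decodeVarintScanB (buffer : List Int) (pos : Int) (n : Nat) (fuel : Nat) : Option Nat :=
  match fuel with
  | 0 => none
  | fuel + 1 =>
    if n = 10 then none  -- ValueError
    else
      match PySem.List.pyGet? buffer (pos + (n : Int)) with
      | none => none  -- IndexError
      | some b =>
        if PySem.Int.band b 128 = 0 then some n
        else decodeVarintScanB buffer pos (n + 1) fuel

def decode_varint_3_alt (buffer : List Int) (pos : Int) : Int × Int :=
  match decodeVarintScanB buffer pos 0 11 with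
  | none => (0, 0)  -- excluded by Pre_
  | some n =>
    -- pass 2: indices pos+n-1 … pos were all read by the scan, so they are in
    -- range and pyGetD with default 0 is exact here
    let raw : Int :=
      if n = 0 then PySem.List.pyGetD buffer pos 0
      else
        (PySem.List.pyRange (pos + (n : Int) - 1) (pos - 1) (-1)).foldl
          (fun raw i => PySem.Int.bor (raw <<< (7 : Nat)) (PySem.Int.band (PySem.List.pyGetD buffer i 0) 127))
          (PySem.Int.band (PySem.List.pyGetD buffer (pos + (n : Int)) 0) 127)
    (PySem.Int.bxor (raw >>> 1) (-(PySem.Int.band raw 1)), pos + (n : Int) + 1)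

-- ===== PRECONDITION & SPEC =====
-- byte at index i exists and has bit 7 clear (varint terminator)
def pvIsTerm (buffer : List Int) (i : Int) : Bool :=
  match PySem.List.pyGet? buffer i with
  | some b => PySem.Int.band b 128 == 0
  | none => false

-- byte at index i exists and has bit 7 set (continuation byte)
def pvIsCont (buffer : List Int) (i : Int) : Bool :=
  match PySem.List.pyGet? buffer i with
  | some b => PySem.Int.band b 128 != 0
  | none => false

-- exactly the inputs where A returns: a terminator within the 10 bytes read,
-- preceded only by continuation bytes, all in range (otherwise A raises
-- IndexError or ValueError("Out of int64 range"))
def Pre_decode_varint_3 (buffer : List Int) (pos : Int) : Prop :=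
  ∃ n : Nat, n < 10 ∧ pvIsTerm buffer (pos + (n : Int)) = true ∧
    ∀ k : Nat, k < n → pvIsCont buffer (pos + (k : Int)) = true

instance (buffer : List Int) (pos : Int) : Decidable (Pre_decode_varint_3 buffer pos) := by
  unfold Pre_decode_varint_3; infer_instance

def pvWitness_decode_varint_3 : List Int × Int := ([0x96, 0x01, 0x05], 0)

def Spec_decode_varint_3 (buffer : List Int) (pos : Int) (out : Int × Int) : Prop := out = decode_varint_3_alt buffer pos
instance (buffer : List Int) (pos : Int) (out : Int × Int) : Decidable (Spec_decode_varint_3 buffer pos out) := by unfold Spec_decode_varint_3; infer_instance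

-- ===== CLAIM (what is proved, stated in full; the proofs are below) =====
def Claim_equal_decode_varint_3 : Prop := ∀ (buffer : List Int) (pos : Int), Dom_decode_varint_3 buffer pos → Pre_decode_varint_3 buffer pos → Spec_decode_varint_3 buffer pos (decode_varint_3 buffer pos)

-- ===== LEMMAS AND PROOFS =====

theorem pvGetD_of_pyGet? {xs : List Int} {i b d : Int} (h : PySem.List.pyGet? xs i = some b) :
    PySem.List.pyGetD xs i d = b := by
  simp [PySem.List.pyGetD, h]

-- a &&& x only depends on x mod 256 when a < 256
theorem pvAndMod (m x : Nat) (hm : m < 256) : m &&& x = m &&& (x % 256) := by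
  have h256 : (256 : Nat) = 2 ^ 8 := by norm_num
  apply Nat.eq_of_testBit_eq
  intro i
  rw [Nat.testBit_and, Nat.testBit_and, h256, Nat.testBit_mod_two_pow]
  by_cases hi : i < 8
  · simp [hi]
  · have hmb : m.testBit i = false :=
      Nat.testBit_lt_two_pow (lt_of_lt_of_le (h256 ▸ hm) (Nat.pow_le_pow_right (by norm_num) (by omega)))
    simp [hmb]

-- bit-0 / bit-7 bookkeeping used by A's fast-path tests and the zigzag step
set_option maxRecDepth 8192 in
theorem pvBits256 : ∀ y < 256, ((y &&& 129) = (y &&& 128) + (y &&& 1)) ∧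
    ((y &&& 128) = 0 ∨ (y &&& 128) = 128) ∧ ((y &&& 1) = 0 ∨ (y &&& 1) = 1) := by decide

set_option maxRecDepth 8192 in
theorem pvBits256Neg : ∀ d < 256, (129 - (129 &&& d) = (128 - (128 &&& d)) + (1 - (1 &&& d))) ∧
    ((128 - (128 &&& d)) = 0 ∨ (128 - (128 &&& d)) = 128) ∧ ((1 - (1 &&& d)) = 0 ∨ (1 - (1 &&& d)) = 1) := by decide

theorem pvBandBits (b : Int) :
    PySem.Int.band b 129 = PySem.Int.band b 128 + PySem.Int.band b 1 ∧
    (PySem.Int.band b 128 = 0 ∨ PySem.Int.band b 128 = 128) ∧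
    (PySem.Int.band b 1 = 0 ∨ PySem.Int.band b 1 = 1) := by
  by_cases hb : 0 ≤ b
  · simp only [PySem.Int.band, hb, if_true, if_pos (by norm_num : (0:Int) ≤ 129),
      if_pos (by norm_num : (0:Int) ≤ 128), if_pos (by norm_num : (0:Int) ≤ 1)]
    set x := b.toNat with hx
    have e129 : (129:Int).toNat = 129 := rfl
    have e128 : (128:Int).toNat = 128 := rfl
    have e1 : (1:Int).toNat = 1 := rfl
    rw [e129, e128, e1, Nat.and_comm x 129, Nat.and_comm x 128, Nat.and_comm x 1,
      pvAndMod 129 x (by norm_num), pvAndMod 128 x (by norm_num), pvAndMod 1 x (by norm_num)]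
    have := pvBits256 (x % 256) (Nat.mod_lt _ (by norm_num))
    rw [Nat.and_comm (x % 256) 129, Nat.and_comm (x % 256) 128, Nat.and_comm (x % 256) 1] at this
    refine ⟨by exact_mod_cast this.1, ?_, ?_⟩
    · rcases this.2.1 with h | h
      · left; exact_mod_cast h
      · right; exact_mod_cast h
    · rcases this.2.2 with h | h
      · left; exact_mod_cast h
      · right; exact_mod_cast h
  · simp only [PySem.Int.band, hb, if_false, if_pos (by norm_num : (0:Int) ≤ 129),
      if_pos (by norm_num : (0:Int) ≤ 128), if_pos (by norm_num : (0:Int) ≤ 1)]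
    set c := (-b - 1).toNat with hc
    have e129 : (129:Int).toNat = 129 := rfl
    have e128 : (128:Int).toNat = 128 := rfl
    have e1 : (1:Int).toNat = 1 := rfl
    rw [e129, e128, e1, pvAndMod 129 c (by norm_num), pvAndMod 128 c (by norm_num),
      pvAndMod 1 c (by norm_num)]
    have h129 : 129 &&& c % 256 ≤ 129 := Nat.and_le_left
    have h128 : 128 &&& c % 256 ≤ 128 := Nat.and_le_left
    have h1 : 1 &&& c % 256 ≤ 1 := Nat.and_le_left
    have := pvBits256Neg (c % 256) (Nat.mod_lt _ (by norm_num))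
    refine ⟨?_, ?_, ?_⟩
    · omega
    · rcases this.2.1 with h | h
      · left; omega
      · right; omega
    · rcases this.2.2 with h | h
      · left; omega
      · right; omega

theorem pvBand127 (b : Int) : 0 ≤ PySem.Int.band b 127 ∧ PySem.Int.band b 127 ≤ 127 := by
  by_cases hb : 0 ≤ b
  · simp only [PySem.Int.band, hb, if_true, if_pos (by norm_num : (0:Int) ≤ 127)]
    have e127 : (127:Int).toNat = 127 := rfl
    rw [e127]
    have : b.toNat &&& 127 ≤ 127 := Nat.and_le_right
    omega
  · simp only [PySem.Int.band, hb, if_false, if_pos (by norm_num : (0:Int) ≤ 127)]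
    have e127 : (127:Int).toNat = 127 := rfl
    rw [e127]
    omega

-- disjoint OR is addition (low part below the shift)
theorem pvLorShiftAddNat : ∀ (sh a m : Nat), a < 2 ^ sh → a ||| (m <<< sh) = m <<< sh + a := by
  intro sh
  induction sh with
  | zero =>
    intro a m h
    have ha : a = 0 := by omega
    simp [ha]
  | succ sh ih =>
    intro a m h
    have hd : Nat.bit (a.testBit 0) (a >>> 1) = a := Nat.bit_testBit_zero_shiftRight_one a
    have hm : m <<< (sh + 1) = Nat.bit false (m <<< sh) := by
      simp [Nat.bit, Nat.shiftLeft_eq, pow_succ]; ring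
    have hq : a >>> 1 < 2 ^ sh := by
      rw [Nat.shiftRight_one]
      have : 2 ^ (sh + 1) = 2 ^ sh * 2 := pow_succ 2 sh
      omega
    have ha : a = 2 * (a >>> 1) + (a.testBit 0).toNat := by
      rw [← hd]; cases a.testBit 0 <;> simp [Nat.bit] <;> omega
    calc a ||| (m <<< (sh + 1))
        = Nat.bit (a.testBit 0) (a >>> 1) ||| Nat.bit false (m <<< sh) := by rw [hd, hm]
      _ = Nat.bit (a.testBit 0 || false) ((a >>> 1) ||| (m <<< sh)) := Nat.lor_bit _ _ _ _
      _ = Nat.bit (a.testBit 0) (m <<< sh + (a >>> 1)) := by rw [Bool.or_false, ih _ m hq]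
      _ = m <<< (sh + 1) + a := by
          have hs : m <<< (sh + 1) = 2 * (m <<< sh) := by
            rw [Nat.shiftLeft_eq, Nat.shiftLeft_eq, pow_succ]; ring
          rw [Nat.bit_val, hs]
          omega

theorem pvBorShiftAdd (acc c : Int) (sh : Nat) (h0 : 0 ≤ acc) (h1 : acc < 2 ^ sh) (hc : 0 ≤ c) :
    PySem.Int.bor acc (c <<< sh) = acc + c * 2 ^ sh := by
  obtain ⟨a, rfl⟩ : ∃ a : Nat, acc = (a : Int) := ⟨acc.toNat, (Int.toNat_of_nonneg h0).symm⟩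
  obtain ⟨m, rfl⟩ : ∃ m : Nat, c = (m : Int) := ⟨c.toNat, (Int.toNat_of_nonneg hc).symm⟩
  have hsh : ((m : Int)) <<< sh = ((m <<< sh : Nat) : Int) := by
    rw [Int.shiftLeft_eq, Nat.shiftLeft_eq]; push_cast; ring
  have ha : a < 2 ^ sh := by exact_mod_cast h1
  rw [hsh, PySem.Int.bor_natCast, pvLorShiftAddNat sh a m ha, Nat.shiftLeft_eq]
  push_cast; ring

-- ghost value: the masked byte at index i, and the little-endian value of the
-- m masked bytes at indices p … p+m-1
def pvChunk (buffer : List Int) (i : Int) : Int := PySem.Int.band (PySem.List.pyGetD buffer i 0) 127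

def pvCombV (buffer : List Int) (p : Int) : Nat → Int
  | 0 => 0
  | m + 1 => pvChunk buffer p + 128 * pvCombV buffer (p + 1) m

theorem pvChunk_bounds (buffer : List Int) (i : Int) :
    0 ≤ pvChunk buffer i ∧ pvChunk buffer i ≤ 127 := pvBand127 _

theorem pvCombV_snoc (buffer : List Int) :
    ∀ (m : Nat) (p : Int), pvCombV buffer p (m + 1) = pvCombV buffer p m + pvChunk buffer (p + (m : Int)) * 128 ^ m := by
  intro m
  induction m with
  | zero => intro p; simp [pvCombV]
  | succ m ih =>
    intro p
    have h1 : pvCombV buffer p (m + 1 + 1) = pvChunk buffer p + 128 * pvCombV buffer (p + 1) (m + 1) := rfl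
    have h2 : pvCombV buffer p (m + 1) = pvChunk buffer p + 128 * pvCombV buffer (p + 1) m := rfl
    rw [h1, ih (p + 1), h2]
    have he : p + 1 + (m : Int) = p + ((m + 1 : Nat) : Int) := by push_cast; ring
    rw [he]
    ring

-- A's loop computes the zigzag of acc + (value of the remaining bytes) · 2^shift
theorem pvLoopA (buffer : List Int) :
    ∀ (m : Nat) (p acc : Int) (sh fuel : Nat),
    (∀ k : Nat, k < m → pvIsCont buffer (p + (k : Int)) = true) →
    pvIsTerm buffer (p + (m : Int)) = true →
    sh + 7 * m ≤ 63 → m < fuel → 0 ≤ acc → acc < 2 ^ sh →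
    decodeVarintLoopA buffer acc p sh fuel =
      (PySem.Int.bxor ((acc + pvCombV buffer p (m + 1) * 2 ^ sh) >>> 1)
        (-(PySem.Int.band (acc + pvCombV buffer p (m + 1) * 2 ^ sh) 1)), p + (m : Int) + 1) := by
  intro m
  induction m with
  | zero =>
    intro p acc sh fuel _ hterm _ hfuel h0 h1
    obtain ⟨fuel, rfl⟩ : ∃ f, fuel = f + 1 := ⟨fuel - 1, by omega⟩
    unfold pvIsTerm at hterm
    rcases hg : PySem.List.pyGet? buffer (p + ((0 : Nat) : Int)) with _ | b
    · rw [hg] at hterm; simp at hterm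
    · rw [hg] at hterm
      simp only [beq_iff_eq] at hterm
      have hg' : PySem.List.pyGet? buffer p = some b := by
        simpa using hg
      simp only [decodeVarintLoopA, hg', hterm, if_true]
      have hchunk : pvChunk buffer p = PySem.Int.band b 127 := by
        unfold pvChunk; rw [pvGetD_of_pyGet? hg']
      have hval : PySem.Int.bor acc (PySem.Int.band b 127 <<< sh) = acc + pvCombV buffer p 1 * 2 ^ sh := by
        rw [pvBorShiftAdd acc _ sh h0 h1 (hchunk ▸ (pvChunk_bounds buffer p).1)]
        simp [pvCombV, hchunk]
      rw [hval]
      simp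
  | succ m ih =>
    intro p acc sh fuel hcont hterm hsh hfuel h0 h1
    obtain ⟨fuel, rfl⟩ : ∃ f, fuel = f + 1 := ⟨fuel - 1, by omega⟩
    have hc0 : pvIsCont buffer (p + ((0 : Nat) : Int)) = true := hcont 0 (by omega)
    unfold pvIsCont at hc0
    rcases hg : PySem.List.pyGet? buffer (p + ((0 : Nat) : Int)) with _ | b
    · rw [hg] at hc0; simp at hc0
    · rw [hg] at hc0
      simp only [bne_iff_ne, ne_eq] at hc0
      have hg' : PySem.List.pyGet? buffer p = some b := by simpa using hg
      simp only [decodeVarintLoopA, hg', hc0, if_false, if_neg (by omega : ¬ sh + 7 ≥ 64)]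
      have hchunk : pvChunk buffer p = PySem.Int.band b 127 := by
        unfold pvChunk; rw [pvGetD_of_pyGet? hg']
      have hb127 := pvChunk_bounds buffer p
      have hacc' : PySem.Int.bor acc (PySem.Int.band b 127 <<< sh) = acc + pvChunk buffer p * 2 ^ sh := by
        rw [pvBorShiftAdd acc _ sh h0 h1 (hchunk ▸ hb127.1)]
        rw [hchunk]
      rw [hacc']
      have hpow : (2 : Int) ^ (sh + 7) = 2 ^ sh * 128 := by rw [pow_add]; norm_num
      have hbnd : acc + pvChunk buffer p * 2 ^ sh < 2 ^ (sh + 7) := by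
        have hp : (0 : Int) < 2 ^ sh := by positivity
        have : pvChunk buffer p * 2 ^ sh ≤ 127 * 2 ^ sh :=
          mul_le_mul_of_nonneg_right hb127.2 (le_of_lt hp)
        rw [hpow]; nlinarith
      have hnn : 0 ≤ acc + pvChunk buffer p * 2 ^ sh := by
        have hp : (0 : Int) ≤ 2 ^ sh := by positivity
        have := mul_nonneg hb127.1 hp
        omega
      rw [ih (p + 1) _ (sh + 7) fuel
        (fun k hk => by
          have := hcont (k + 1) (by omega)
          have he : p + ((k + 1 : Nat) : Int) = p + 1 + (k : Int) := by push_cast; ring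
          rwa [he] at this)
        (by
          have he : p + (((m : Nat) + 1 : Nat) : Int) = p + 1 + (m : Int) := by push_cast; ring
          rwa [he] at hterm)
        (by omega) (by omega) hnn hbnd]
      have hv : acc + pvChunk buffer p * 2 ^ sh + pvCombV buffer (p + 1) (m + 1) * 2 ^ (sh + 7)
          = acc + pvCombV buffer p (m + 1 + 1) * 2 ^ sh := by
        have : pvCombV buffer p (m + 1 + 1) = pvChunk buffer p + 128 * pvCombV buffer (p + 1) (m + 1) := rfl
        rw [this, hpow]; ring
      rw [hv]
      have hpos : p + 1 + (m : Int) + 1 = p + ((m + 1 : Nat) : Int) + 1 := by push_cast; ring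
      rw [hpos]

-- B's scan finds exactly the terminator offset n
theorem pvScanB (buffer : List Int) (pos : Int) (n : Nat) (hn : n < 10)
    (hterm : pvIsTerm buffer (pos + (n : Int)) = true)
    (hcont : ∀ k : Nat, k < n → pvIsCont buffer (pos + (k : Int)) = true) :
    ∀ (fuel j : Nat), j ≤ n → n - j < fuel → decodeVarintScanB buffer pos j fuel = some n := by
  intro fuel
  induction fuel with
  | zero => intro j _ h; omega
  | succ fuel ih =>
    intro j hj hf
    by_cases hjn : j = n
    · subst hjn
      unfold pvIsTerm at hterm
      rcases hg : PySem.List.pyGet? buffer (pos + (j : Int)) with _ | b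
      · rw [hg] at hterm; simp at hterm
      · rw [hg] at hterm
        simp only [beq_iff_eq] at hterm
        unfold decodeVarintScanB
        rw [if_neg (by omega : ¬ j = 10), hg]
        simp [hterm]
    · have hjn' : j < n := by omega
      have hc := hcont j hjn'
      unfold pvIsCont at hc
      rcases hg : PySem.List.pyGet? buffer (pos + (j : Int)) with _ | b
      · rw [hg] at hc; simp at hc
      · rw [hg] at hc
        simp only [bne_iff_ne, ne_eq] at hc
        unfold decodeVarintScanB
        rw [if_neg (by omega : ¬ j = 10), hg]
        simp only [if_neg hc]
        exact ih (j + 1) (by omega) (by omega)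

-- B's backward fold stacks the groups below raw
theorem pvFoldB (buffer : List Int) :
    ∀ (m : Nat) (p raw : Int), 0 ≤ raw →
    (PySem.List.pyRange (p + (m : Int) - 1) (p - 1) (-1)).foldl
      (fun raw i => PySem.Int.bor (raw <<< (7 : Nat)) (PySem.Int.band (PySem.List.pyGetD buffer i 0) 127)) raw
      = raw * 2 ^ (7 * m) + pvCombV buffer p m := by
  intro m
  induction m with
  | zero =>
    intro p raw _
    rw [show p + ((0 : Nat) : Int) - 1 = p - 1 by push_cast; ring,
      PySem.List.pyRange_neg_one_eq_nil (le_refl _)]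
    simp [pvCombV]
  | succ m ih =>
    intro p raw hraw
    rw [show p + ((m + 1 : Nat) : Int) - 1 = p + (m : Int) by push_cast; ring,
      PySem.List.pyRange_neg_one_cons (by omega : p - 1 < p + (m : Int)),
      show p + (m : Int) - 1 = p + (m : Int) - 1 from rfl]
    simp only [List.foldl_cons]
    have hb := pvChunk_bounds buffer (p + (m : Int))
    have hstep : PySem.Int.bor (raw <<< (7 : Nat)) (PySem.Int.band (PySem.List.pyGetD buffer (p + (m : Int)) 0) 127)
        = pvChunk buffer (p + (m : Int)) + raw * 2 ^ 7 := by
      rw [PySem.Int.bor_comm]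
      exact pvBorShiftAdd (pvChunk buffer (p + (m : Int))) raw 7 hb.1
        (by
          have h2 := hb.2
          have h27 : (2 : Int) ^ 7 = 128 := by norm_num
          omega) hraw
    rw [hstep, ih p _ (by have := hb.1; positivity)]
    rw [pvCombV_snoc buffer m p]
    have h128 : (128 : Int) ^ m = 2 ^ (7 * m) := by
      rw [show (128 : Int) = 2 ^ 7 by norm_num, ← pow_mul]
    rw [h128, show 7 * (m + 1) = 7 * m + 7 by ring, pow_add]
    ring

-- ===== VERDICT (by name: the statement is the Claim_ definition above) =====
theorem decode_varint_3_spec : Claim_equal_decode_varint_3 := by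
  intro buffer pos _ hPre
  obtain ⟨n, hn, hterm, hcont⟩ := hPre
  unfold Spec_decode_varint_3
  -- evaluate B
  have hscan : decodeVarintScanB buffer pos 0 11 = some n :=
    pvScanB buffer pos n hn hterm hcont 11 0 (by omega) (by omega)
  -- evaluate A's first byte
  cases n with
  | zero =>
    unfold pvIsTerm at hterm
    rcases hg : PySem.List.pyGet? buffer (pos + ((0 : Nat) : Int)) with _ | b
    · rw [hg] at hterm; simp at hterm
    · rw [hg] at hterm
      simp only [beq_iff_eq] at hterm
      have hg' : PySem.List.pyGet? buffer pos = some b := by simpa using hg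
      have hbits := pvBandBits b
      simp only [decode_varint_3, decode_varint_3_alt, hscan, hg',
        pvGetD_of_pyGet? hg']
      by_cases h129 : PySem.Int.band b 129 = 0
      · have h1 : PySem.Int.band b 1 = 0 := by omega
        simp [h129, h1]
      · have h1 : PySem.Int.band b 1 = 1 := by omega
        have hnot : Int.not 0 = -1 := by decide
        simp [h129, hterm, h1, hnot]
  | succ m =>
    have hc0 := hcont 0 (by omega)
    unfold pvIsCont at hc0
    rcases hg : PySem.List.pyGet? buffer (pos + ((0 : Nat) : Int)) with _ | b
    · rw [hg] at hc0; simp at hc0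
    · rw [hg] at hc0
      simp only [bne_iff_ne, ne_eq] at hc0
      have hg' : PySem.List.pyGet? buffer pos = some b := by simpa using hg
      have hbits := pvBandBits b
      have h129 : ¬ PySem.Int.band b 129 = 0 := by omega
      have hchunk : pvChunk buffer pos = PySem.Int.band b 127 := by
        unfold pvChunk; rw [pvGetD_of_pyGet? hg']
      have hb127 := pvChunk_bounds buffer pos
      -- A's side: the loop
      have hA := pvLoopA buffer m (pos + 1) (PySem.Int.band b 127) 7 9
        (fun k hk => by
          have := hcont (k + 1) (by omega)
          have he : pos + ((k + 1 : Nat) : Int) = pos + 1 + (k : Int) := by push_cast; ring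
          rwa [he] at this)
        (by
          have he : pos + ((m + 1 : Nat) : Int) = pos + 1 + (m : Int) := by push_cast; ring
          rwa [he] at hterm)
        (by omega) (by omega) (hchunk ▸ hb127.1) (by
          rw [← hchunk]
          have h2 := hb127.2
          have : (2 : Int) ^ 7 = 128 := by norm_num
          omega)
      -- B's side: the fold
      have hB := pvFoldB buffer (m + 1) pos
        (PySem.Int.band (PySem.List.pyGetD buffer (pos + ((m + 1 : Nat) : Int)) 0) 127)
        (pvBand127 _).1
      simp only [decode_varint_3, decode_varint_3_alt, hscan, hg', if_neg h129, if_neg hc0,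
        if_neg (by omega : ¬ m + 1 = 0)]
      rw [hA, hB]
      have hvals : PySem.Int.band b 127 + pvCombV buffer (pos + 1) (m + 1) * 2 ^ 7
          = PySem.Int.band (PySem.List.pyGetD buffer (pos + ((m + 1 : Nat) : Int)) 0) 127 * 2 ^ (7 * (m + 1))
            + pvCombV buffer pos (m + 1) := by
        have hcomb : pvCombV buffer pos (m + 1 + 1)
            = pvChunk buffer pos + 128 * pvCombV buffer (pos + 1) (m + 1) := rfl
        have h128 : (128 : Int) ^ (m + 1) = 2 ^ (7 * (m + 1)) := by
          rw [show (128 : Int) = 2 ^ 7 by norm_num, ← pow_mul]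
        have hkey : pvChunk buffer pos + 128 * pvCombV buffer (pos + 1) (m + 1)
            = pvCombV buffer pos (m + 1) + pvChunk buffer (pos + ((m + 1 : Nat) : Int)) * 128 ^ (m + 1) := by
          rw [← hcomb, pvCombV_snoc buffer (m + 1) pos]
        rw [hchunk, h128] at hkey
        unfold pvChunk at hkey
        have h27 : (2 : Int) ^ 7 = 128 := by norm_num
        rw [h27]
        linarith [hkey]
      rw [hvals]
      have hpos : pos + 1 + (m : Int) + 1 = pos + ((m + 1 : Nat) : Int) + 1 := by push_cast; ring
      rw [hpos]
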